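-- pv_equiv track=rewrite | github.com/L2301/sgk | Components/method/count_matrix.py | count_transitions_sparse
-- ===== SOURCE A (Python) =====
-- from collections import defaultdict
--
-- VOCAB_SIZE = 50257
--
-- def ngram_to_index(ngram: tuple[int, ...], vocab_size: int = VOCAB_SIZE) -> int:
--     """
--     Convert an n-gram tuple to a flat row index.
--
--     For n-gram (t0, t1, ..., t_{n-1}):
--     index = t0 * vocab^{n-1} + t1 * vocab^{n-2} + ... + t_{n-1}
--
--     Args:
--         ngram: Tuple of token IDs
--         vocab_size: Size of vocabulary
--
--     Returns:
--         Flat index for the n-gram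
--     """
--     n = len(ngram)
--     index = 0
--     for i, token in enumerate(ngram):
--         index += token * (vocab_size ** (n - 1 - i))
--     return index
--
-- def count_transitions_sparse(
--     tokens: list[int],
--     n: int,
--     s: int,
--     vocab_size: int = VOCAB_SIZE
-- ) -> dict[tuple[int, int], int]:
--     """
--     Count n-gram → token transitions in a token sequence.
--     Returns sparse representation as dict of {(row, col): count}.
--
--     Args:
--         tokens: List of token IDs
--         n: N-gram size
--         s: Skip value
--         vocab_size: Vocabulary size
--
--     Returns:
--         Dictionary mapping (ngram_index, target_token) to count
--     """
--     counts = defaultdict(int)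
--     seq_len = len(tokens)
--
--     # For each valid starting position
--     # n-gram spans [i, i+n-1], target is at i+n+s
--     for i in range(seq_len - n - s):
--         ngram = tuple(tokens[i:i + n])
--         target = tokens[i + n + s]
--
--         ngram_idx = ngram_to_index(ngram, vocab_size)
--         counts[(ngram_idx, target)] += 1
--
--     return dict(counts)
-- ===== SOURCE B (Python) =====
-- VOCAB_SIZE = 50257
--
-- def count_transitions_sparse(tokens, n, s, vocab_size=VOCAB_SIZE):
--     """Rolling-window variant: Horner index for the first n-gram, then each
--     next index is derived from the previous one with one precomputed power."""
--     L = len(tokens)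
--     m = L - n - s
--     counts = {}
--     if m <= 0:
--         return counts
--     p = vocab_size ** (n - 1)
--     idx = 0
--     for t in tokens[:n]:
--         idx = idx * vocab_size + t
--     for i in range(m):
--         key = (idx, tokens[i + n + s])
--         counts[key] = counts.get(key, 0) + 1
--         if i + 1 < m:
--             idx = (idx - tokens[i] * p) * vocab_size + tokens[i + n]
--     return counts
-- ===== Notes on version B (the rewrite author's own statement) =====
-- stated objective: alternative
-- what changed: Replaces the per-window power-sum recomputation (ngram_to_index over each slice) by a Horner evaluation of the first window followed by a rolling index update per slide, with the single needed power precomputed.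
-- outside the precondition, e.g. on count_transitions_sparse([1, 2], 0, 0, 5): A returns {(0, 1): 1, (0, 2): 1}, B returns {(0, 1): 1, (0.0, 2): 1}; on count_transitions_sparse([0, 1], -1, -1, -1): A returns {(0, 0): 2, (0, 1): 2}, B raises IndexError
import Mathlib
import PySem

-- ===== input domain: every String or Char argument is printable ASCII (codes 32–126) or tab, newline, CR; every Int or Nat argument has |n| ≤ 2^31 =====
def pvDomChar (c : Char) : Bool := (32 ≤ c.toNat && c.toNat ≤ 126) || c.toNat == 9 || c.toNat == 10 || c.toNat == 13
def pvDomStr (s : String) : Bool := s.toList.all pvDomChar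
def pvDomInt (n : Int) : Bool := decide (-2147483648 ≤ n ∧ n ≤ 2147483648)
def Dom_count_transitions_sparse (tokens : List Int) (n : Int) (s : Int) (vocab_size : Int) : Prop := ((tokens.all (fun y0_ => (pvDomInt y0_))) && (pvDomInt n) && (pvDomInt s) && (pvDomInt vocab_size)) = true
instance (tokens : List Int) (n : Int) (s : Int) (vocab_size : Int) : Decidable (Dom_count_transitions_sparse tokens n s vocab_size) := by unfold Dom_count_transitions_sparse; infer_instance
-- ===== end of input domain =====

-- B replaces A's per-window power-sum index recomputation by a Horner evaluation of the
-- first window plus a rolling index update per slide (objective: alternative).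

-- ===== PORT A =====
def ngram_to_index (ngram : List Int) (vocab_size : Int) : Int :=
  let n : Int := ngram.length
  (PySem.List.enumerate ngram 0).foldl
    (fun index p => index + p.2 * vocab_size ^ (n - 1 - p.1).toNat) 0

def count_transitions_sparse (tokens : List Int) (n : Int) (s : Int) (vocab_size : Int) : List (Int × Int × Int) :=
  let seq_len : Int := tokens.length
  let counts : PySem.Dict (Int × Int) Int :=
    (PySem.List.pyRange 0 (seq_len - n - s) 1).foldl
      (fun d i =>
        let ngram := PySem.List.slice tokens (some i) (some (i + n))
        let target := PySem.List.pyGetD tokens (i + n + s) 0   -- in range under Pre_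
        let ngram_idx := ngram_to_index ngram vocab_size
        d.modify (ngram_idx, target) 0 (· + 1))
      PySem.Dict.empty
  counts.items.map (fun q => (q.1.1, q.1.2, q.2))

-- ===== PORT B =====
def count_transitions_sparse_alt (tokens : List Int) (n : Int) (s : Int) (vocab_size : Int) : List (Int × Int × Int) :=
  let L : Int := tokens.length
  let m := L - n - s
  if m ≤ 0 then []
  else
    let p := vocab_size ^ (n - 1).toNat   -- exponent n-1 ≥ 0 under Pre_
    let idx0 := (PySem.List.slice tokens none (some n)).foldl (fun idx t => idx * vocab_size + t) 0
    let st :=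
      (PySem.List.pyRange 0 m 1).foldl
        (fun (st : Int × PySem.Dict (Int × Int) Int) i =>
          let key := (st.1, PySem.List.pyGetD tokens (i + n + s) 0)
          let d := st.2.insert key (st.2.getD key 0 + 1)
          let idx := if i + 1 < m then
              (st.1 - (PySem.List.pyGetD tokens i 0) * p) * vocab_size + PySem.List.pyGetD tokens (i + n) 0
            else st.1
          (idx, d))
        (idx0, PySem.Dict.empty)
    st.2.items.map (fun q => (q.1.1, q.1.2, q.2))

-- ===== PRECONDITION & SPEC =====
-- Pre_ excludes inputs that have at least one window but a degenerate window spec (n < 1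
-- or s < 0): there A's slice clamping / negative-index wraparound yields accidental
-- results or an IndexError, while B's rolling window assumes a genuine n-gram window.
def Pre_count_transitions_sparse (tokens : List Int) (n : Int) (s : Int) (vocab_size : Int) : Prop :=
  (1 ≤ n ∧ 0 ≤ s) ∨ (tokens.length : Int) ≤ n + s
instance (tokens : List Int) (n : Int) (s : Int) (vocab_size : Int) : Decidable (Pre_count_transitions_sparse tokens n s vocab_size) := by unfold Pre_count_transitions_sparse; infer_instance

def pvWitness_count_transitions_sparse : List Int × Int × Int × Int := ([1, 2, 3, 1, 2], 2, 0, 5)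

def Spec_count_transitions_sparse (tokens : List Int) (n : Int) (s : Int) (vocab_size : Int) (out : List (Int × Int × Int)) : Prop := out = count_transitions_sparse_alt tokens n s vocab_size
instance (tokens : List Int) (n : Int) (s : Int) (vocab_size : Int) (out : List (Int × Int × Int)) : Decidable (Spec_count_transitions_sparse tokens n s vocab_size out) := by unfold Spec_count_transitions_sparse; infer_instance

-- ===== CLAIM (what is proved, stated in full; the proofs are below) =====
def Claim_equal_count_transitions_sparse : Prop := ∀ (tokens : List Int) (n : Int) (s : Int) (vocab_size : Int), Dom_count_transitions_sparse tokens n s vocab_size → Pre_count_transitions_sparse tokens n s vocab_size → Spec_count_transitions_sparse tokens n s vocab_size (count_transitions_sparse tokens n s vocab_size)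

-- ===== LEMMAS AND PROOFS =====


-- helper abbreviations used only by the proofs
def pvHorner (v : Int) (w : List Int) : Int := w.foldl (fun a t => a * v + t) 0

def pvF (tokens : List Int) (n v : Int) (i : Int) : Int :=
  pvHorner v (PySem.List.slice tokens (some i) (some (i + n)))

def pvKey (tokens : List Int) (n s v : Int) (i : Int) : Int × Int :=
  (pvF tokens n v i, PySem.List.pyGetD tokens (i + n + s) 0)

-- A's power-sum index of a window is the Horner value of that window
-- sum form of A's enumerate loop
theorem ngram_sum (w : List Int) (v : Int) :
    ((PySem.List.enumerate w 0).map
        (fun p => p.2 * v ^ (((w.length : Int)) - 1 - p.1).toNat)).sum = pvHorner v w := by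
  induction w using List.reverseRecOn with
  | nil => rfl
  | append_singleton w x ih =>
    rw [PySem.List.enumerate_append]
    have hmapeq : (PySem.List.enumerate w 0).map
        (fun p => p.2 * v ^ ((((w ++ [x]).length : Int)) - 1 - p.1).toNat)
        = (PySem.List.enumerate w 0).map
        (fun p => v * (p.2 * v ^ (((w.length : Int)) - 1 - p.1).toNat)) := by
      apply List.map_congr_left
      intro p hp
      obtain ⟨k, hk, rfl⟩ := (PySem.List.mem_enumerate_iff _ _ _).mp hp
      have he : (((w ++ [x]).length : Int) - 1 - (0 + (k : Int))).toNat
          = ((w.length : Int) - 1 - (0 + (k : Int))).toNat + 1 := by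
        simp only [List.length_append, List.length_singleton]
        omega
      rw [he, pow_succ]
      ring
    simp only [List.map_append, List.sum_append, hmapeq]
    have hsum : ((PySem.List.enumerate w 0).map
        (fun p => v * (p.2 * v ^ (((w.length : Int)) - 1 - p.1).toNat))).sum
        = v * ((PySem.List.enumerate w 0).map
        (fun p => p.2 * v ^ (((w.length : Int)) - 1 - p.1).toNat)).sum := by
      rw [← List.sum_map_mul_left]
    rw [hsum, ih]
    have htail : (PySem.List.enumerate [x] (0 + (w.length : Int))).map
        (fun p => p.2 * v ^ ((((w ++ [x]).length : Int)) - 1 - p.1).toNat) = [x] := by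
      simp only [PySem.List.enumerate_cons, PySem.List.enumerate_nil, List.map_cons,
        List.map_nil, List.length_append, List.length_singleton]
      norm_num
    rw [htail]
    unfold pvHorner
    rw [List.foldl_append]
    simp only [List.foldl_cons, List.foldl_nil, List.sum_cons, List.sum_nil]
    ring

theorem ngram_to_index_eq_horner (w : List Int) (v : Int) :
    ngram_to_index w v = pvHorner v w := by
  unfold ngram_to_index
  rw [PySem.List.foldl_add, ngram_sum, zero_add]

-- affine law for the Horner fold
theorem horner_foldl_affine (w : List Int) (v c : Int) :
    w.foldl (fun a t => a * v + t) c = c * v ^ w.length + pvHorner v w := by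
  induction w generalizing c with
  | nil => simp [pvHorner]
  | cons t w ih =>
    simp only [List.foldl_cons, List.length_cons, pvHorner] at *
    rw [ih (c * v + t), ih (0 * v + t)]
    ring

-- rolling update: the next window's Horner value from the current one
theorem horner_roll (tokens : List Int) (n v : Int) (j : Int)
    (hn : 1 ≤ n) (h0 : 0 ≤ j) (hj : j + n < (tokens.length : Int)) :
    pvF tokens n v (j + 1)
      = (pvF tokens n v j - (PySem.List.pyGetD tokens j 0) * v ^ (n - 1).toNat) * v
        + PySem.List.pyGetD tokens (j + n) 0 := by
  set k := j.toNat with hk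
  set nn := n.toNat with hnn
  have hj' : j = (k : Int) := by omega
  have hn' : n = (nn : Int) := by omega
  have hlen : k + nn < tokens.length := by omega
  have hk' : k < tokens.length := by omega
  have hnn1 : 1 ≤ nn := by omega
  -- both windows as drop/take
  have hw1 : PySem.List.slice tokens (some j) (some (j + n))
      = (tokens.drop k).take nn := by
    rw [hj', hn', PySem.List.slice_natCast_add]
  have hw2 : PySem.List.slice tokens (some (j + 1)) (some (j + 1 + n))
      = (tokens.drop (k + 1)).take nn := by
    rw [show j + 1 = ((k + 1 : Nat) : Int) by omega,
        show ((k + 1 : Nat) : Int) + n = ((k + 1 : Nat) : Int) + ((nn : Nat) : Int) by omega,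
        PySem.List.slice_natCast_add]
  -- the two indexed elements
  have hget1 : PySem.List.pyGetD tokens j 0 = tokens.getD k 0 := by
    rw [hj', PySem.List.pyGetD_natCast]
  have hget2 : PySem.List.pyGetD tokens (j + n) 0 = tokens.getD (k + nn) 0 := by
    rw [show j + n = ((k + nn : Nat) : Int) by omega, PySem.List.pyGetD_natCast]
  -- decompose window k
  have hW1 : (tokens.drop k).take nn
      = tokens.getD k 0 :: (tokens.drop (k + 1)).take (nn - 1) := by
    rw [List.drop_eq_getElem_cons hk',
        show tokens[k]'hk' = tokens.getD k 0 from (List.getD_eq_getElem tokens 0 hk').symm,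
        show nn = (nn - 1) + 1 by omega, List.take_succ_cons]
    simp
  -- decompose window k+1
  have hW2 : (tokens.drop (k + 1)).take nn
      = (tokens.drop (k + 1)).take (nn - 1) ++ [tokens.getD (k + nn) 0] := by
    rw [show nn = (nn - 1) + 1 by omega, List.take_add_one]
    congr 1
    rw [List.getElem?_drop, show k + 1 + (nn - 1) = k + nn by omega,
        List.getElem?_eq_getElem hlen,
        show tokens[k + nn]'hlen = tokens.getD (k + nn) 0 from
          (List.getD_eq_getElem tokens 0 hlen).symm]
    simp only [Option.toList_some]
    congr 2
    omega
  have hMlen : ((tokens.drop (k + 1)).take (nn - 1)).length = nn - 1 := by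
    rw [List.length_take, List.length_drop]
    omega
  unfold pvF
  rw [hw1, hw2, hget1, hget2, hW1, hW2]
  unfold pvHorner
  rw [List.foldl_append, List.foldl_cons]
  simp only [List.foldl_cons, List.foldl_nil]
  rw [show (0 : Int) * v + tokens.getD k 0 = tokens.getD k 0 by ring]
  rw [horner_foldl_affine _ v (tokens.getD k 0), hMlen]
  rw [show (n - 1).toNat = nn - 1 by omega]
  unfold pvHorner
  ring

-- B's loop: the dict component is the insert-count fold over the key sequence
theorem alt_loop_inv (tokens : List Int) (n s v m : Int)
    (hn : 1 ≤ n) (hs : 0 ≤ s) (hm : m = (tokens.length : Int) - n - s) :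
    ∀ (c : Nat) (j : Int) (d : PySem.Dict (Int × Int) Int), 0 ≤ j → j < m → (m - j).toNat = c →
    ((PySem.List.pyRange j m 1).foldl
        (fun (st : Int × PySem.Dict (Int × Int) Int) i =>
          let key := (st.1, PySem.List.pyGetD tokens (i + n + s) 0)
          let d := st.2.insert key (st.2.getD key 0 + 1)
          let idx := if i + 1 < m then
              (st.1 - (PySem.List.pyGetD tokens i 0) * v ^ (n - 1).toNat) * v + PySem.List.pyGetD tokens (i + n) 0
            else st.1
          (idx, d))
        (pvF tokens n v j, d)).2
      = ((PySem.List.pyRange j m 1).map (pvKey tokens n s v)).foldl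
          (fun d k => d.insert k (d.getD k 0 + 1)) d := by
  intro c
  induction c with
  | zero =>
    intro j d h0 hjm hc
    omega
  | succ c ih =>
    intro j d h0 hjm hc
    rw [PySem.List.pyRange_one_cons hjm]
    simp only [List.foldl_cons, List.map_cons]
    by_cases hnext : j + 1 < m
    · have hroll : (if j + 1 < m then
            (pvF tokens n v j - (PySem.List.pyGetD tokens j 0) * v ^ (n - 1).toNat) * v
              + PySem.List.pyGetD tokens (j + n) 0
          else pvF tokens n v j) = pvF tokens n v (j + 1) := by
        rw [if_pos hnext, ← horner_roll tokens n v j hn h0 (by omega)]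
      rw [hroll]
      exact ih (j + 1) _ (by omega) hnext (by omega)
    · rw [PySem.List.pyRange_one_eq_nil (by omega)]
      simp only [List.foldl_nil, List.map_nil]
      rfl

-- ===== VERDICT (by name: the statement is the Claim_ definition above) =====
theorem count_transitions_sparse_spec : Claim_equal_count_transitions_sparse := by
  intro tokens n s v _hdom hpre
  unfold Spec_count_transitions_sparse count_transitions_sparse count_transitions_sparse_alt
  by_cases hm : (tokens.length : Int) - n - s ≤ 0
  · simp only [hm, if_pos]
    rw [PySem.List.pyRange_one_eq_nil (by omega)]
    simp [PySem.Dict.empty]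
  · have hmpos : 0 < (tokens.length : Int) - n - s := by omega
    obtain ⟨hn, hs⟩ : 1 ≤ n ∧ 0 ≤ s := by
      rcases hpre with h | h
      · exact h
      · omega
    simp only [if_neg hm]
    have hidx0 : (PySem.List.slice tokens none (some n)).foldl (fun idx t => idx * v + t) 0
        = pvF tokens n v 0 := by
      unfold pvF pvHorner
      rw [zero_add, ← PySem.List.slice_zero_start]
    rw [hidx0]
    rw [alt_loop_inv tokens n s v _ hn hs rfl ((tokens.length : Int) - n - s - 0).toNat 0
          PySem.Dict.empty le_rfl (by omega) rfl]
    have hA : (fun (d : PySem.Dict (Int × Int) Int) (i : Int) =>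
        d.modify (ngram_to_index (PySem.List.slice tokens (some i) (some (i + n))) v,
                  PySem.List.pyGetD tokens (i + n + s) 0) 0 (· + 1))
        = fun d i => d.modify (pvKey tokens n s v i) 0 (· + 1) := by
      funext d i
      rw [ngram_to_index_eq_horner]
      rfl
    rw [hA]
    rw [show ((PySem.List.pyRange 0 ((tokens.length : Int) - n - s) 1).foldl
          (fun (d : PySem.Dict (Int × Int) Int) i => d.modify (pvKey tokens n s v i) 0 (· + 1))
          PySem.Dict.empty)
        = ((PySem.List.pyRange 0 ((tokens.length : Int) - n - s) 1).map (pvKey tokens n s v)).foldl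
          (fun d k => d.modify k 0 (· + 1)) PySem.Dict.empty from (List.foldl_map (f := pvKey tokens n s v) (g := fun (d : PySem.Dict (Int × Int) Int) k => d.modify k 0 (· + 1))).symm]
    rw [PySem.Dict.foldl_insert_getD_add_one_eq_counter, PySem.Dict.counter_eq_foldl]
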